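-- pv_equiv track=rewrite | github.com/qianqian5774/triangulum-daily3albums | daily3albums/dry_run.py | _extract_reject_reason
-- ===== SOURCE A (Python) =====
-- def _extract_reject_reason(dbg: list[str]) -> str:
--     for line in reversed(dbg):
--         if "search:rejected ambiguous" in line:
--             return "ambiguous"
--         if "search:rejected confidence" in line:
--             return "low_confidence"
--         if line.startswith("final:none") or "search:final=none" in line:
--             return "no_match"
--     return "none"
-- ===== SOURCE B (Python) =====
-- def _extract_reject_reason(dbg: list[str]) -> str:
--     reason = "none"
--     for line in dbg:
--         if "search:rejected ambiguous" in line: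
--             reason = "ambiguous"
--         elif "search:rejected confidence" in line:
--             reason = "low_confidence"
--         elif line.startswith("final:none") or "search:final=none" in line:
--             reason = "no_match"
--     return reason
-- ===== Notes on version B (the rewrite author's own statement) =====
-- stated objective: alternative
-- what changed: Replaced the reversed-iteration loop with early return by a forward single pass that accumulates the reason, overwriting it on each matching line; the last forward match equals the first reverse match.
import Mathlib
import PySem

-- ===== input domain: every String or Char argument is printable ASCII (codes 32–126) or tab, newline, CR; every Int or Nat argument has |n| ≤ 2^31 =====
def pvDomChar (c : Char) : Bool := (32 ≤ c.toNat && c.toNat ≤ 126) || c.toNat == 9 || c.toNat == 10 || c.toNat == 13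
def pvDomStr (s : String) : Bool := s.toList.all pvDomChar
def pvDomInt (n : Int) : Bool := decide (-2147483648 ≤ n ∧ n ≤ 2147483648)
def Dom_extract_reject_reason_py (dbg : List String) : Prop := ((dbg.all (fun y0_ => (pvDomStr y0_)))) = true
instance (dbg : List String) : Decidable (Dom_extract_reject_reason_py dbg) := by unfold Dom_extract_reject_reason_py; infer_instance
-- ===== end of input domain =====

-- B replaces A's reversed loop with early return by a forward accumulating pass (alternative decomposition, same cost).

-- ===== PORT A =====
-- reverse loop with early return, transcribed as structural recursion over dbg.reverse
def extractRejectLoopA : List String → String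
  | [] => "none"
  | line :: rest =>
    if PySem.Str.isIn "search:rejected ambiguous" line then "ambiguous"
    else if PySem.Str.isIn "search:rejected confidence" line then "low_confidence"
    else if PySem.Str.startswith line "final:none" || PySem.Str.isIn "search:final=none" line then "no_match"
    else extractRejectLoopA rest

def extract_reject_reason_py (dbg : List String) : String :=
  extractRejectLoopA dbg.reverse

-- ===== PORT B =====
-- forward fold with accumulator 'reason'
def extract_reject_reason_py_alt (dbg : List String) : String :=
  dbg.foldl (fun reason line =>
    if PySem.Str.isIn "search:rejected ambiguous" line then "ambiguous"
    else if PySem.Str.isIn "search:rejected confidence" line then "low_confidence"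
    else if PySem.Str.startswith line "final:none" || PySem.Str.isIn "search:final=none" line then "no_match"
    else reason) "none"

-- ===== PRECONDITION & SPEC =====
def Spec_extract_reject_reason_py (dbg : List String) (out : String) : Prop := out = extract_reject_reason_py_alt dbg
instance (dbg : List String) (out : String) : Decidable (Spec_extract_reject_reason_py dbg out) := by unfold Spec_extract_reject_reason_py; infer_instance

-- ===== CLAIM (what is proved, stated in full; the proofs are below) =====
def Claim_equal_extract_reject_reason_py : Prop := ∀ (dbg : List String), Dom_extract_reject_reason_py dbg → Spec_extract_reject_reason_py dbg (extract_reject_reason_py dbg)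

-- ===== LEMMAS AND PROOFS =====

-- A's loop, generalized over the value returned when no line matches
def extractRejectLoopA' (dflt : String) : List String → String
  | [] => dflt
  | line :: rest =>
    if PySem.Str.isIn "search:rejected ambiguous" line then "ambiguous"
    else if PySem.Str.isIn "search:rejected confidence" line then "low_confidence"
    else if PySem.Str.startswith line "final:none" || PySem.Str.isIn "search:final=none" line then "no_match"
    else extractRejectLoopA' dflt rest

lemma loopA_eq_loopA' (xs : List String) : extractRejectLoopA xs = extractRejectLoopA' "none" xs := by
  induction xs with
  | nil => rfl
  | cons x xs ih => simp [extractRejectLoopA, extractRejectLoopA', ih]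

-- one-line step of B's fold
def stepB (reason line : String) : String :=
  if PySem.Str.isIn "search:rejected ambiguous" line then "ambiguous"
  else if PySem.Str.isIn "search:rejected confidence" line then "low_confidence"
  else if PySem.Str.startswith line "final:none" || PySem.Str.isIn "search:final=none" line then "no_match"
  else reason

lemma loopA'_append_singleton (ys : List String) (x dflt : String) :
    extractRejectLoopA' dflt (ys ++ [x]) = extractRejectLoopA' (stepB dflt x) ys := by
  induction ys with
  | nil => simp [extractRejectLoopA', stepB]
  | cons y ys ih =>
    simp only [List.cons_append, extractRejectLoopA']
    split_ifs <;> simp_all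

lemma loopA'_reverse_eq_foldl (xs : List String) (dflt : String) :
    extractRejectLoopA' dflt xs.reverse = xs.foldl stepB dflt := by
  induction xs generalizing dflt with
  | nil => rfl
  | cons x xs ih => simpa [loopA'_append_singleton] using ih (stepB dflt x)

-- ===== VERDICT (by name: the statement is the Claim_ definition above) =====
theorem extract_reject_reason_py_spec : Claim_equal_extract_reject_reason_py := by
  intro dbg _
  show extract_reject_reason_py dbg = extract_reject_reason_py_alt dbg
  rw [extract_reject_reason_py, loopA_eq_loopA', loopA'_reverse_eq_foldl]
  rfl
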